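-- pv_equiv track=rewrite | github.com/nddung3811/UAV_MCV | src/core/fitness.py | split_edges_by_uav
-- ===== SOURCE A (Python) =====
-- def split_edges_by_uav(n_edges: int, n_uav: int) -> list[tuple[int, int]]:
--
--     n_uav = int(n_uav)
--     base = n_edges // n_uav
--     rem = n_edges % n_uav
--
--     blocks = []
--     start = 0
--     for i in range(n_uav):
--         size = base + (1 if i < rem else 0)
--         blocks.append((start, start + size))
--         start += size
--
--     return blocks
-- ===== SOURCE B (Python) =====
-- def split_edges_by_uav(n_edges: int, n_uav: int) -> list[tuple[int, int]]:
--     n_uav = int(n_uav)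
--     base = n_edges // n_uav
--     rem = n_edges % n_uav
--     return [(i * base + min(i, rem), (i + 1) * base + min(i + 1, rem))
--             for i in range(n_uav)]
-- ===== Notes on version B (the rewrite author's own statement) =====
-- stated objective: alternative
-- what changed: Replaces the sequential running-start accumulator loop with an independent closed-form boundary computation per block (start_i = i*base + min(i, rem)), so blocks are computed position-wise instead of accumulated.
import Mathlib
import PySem

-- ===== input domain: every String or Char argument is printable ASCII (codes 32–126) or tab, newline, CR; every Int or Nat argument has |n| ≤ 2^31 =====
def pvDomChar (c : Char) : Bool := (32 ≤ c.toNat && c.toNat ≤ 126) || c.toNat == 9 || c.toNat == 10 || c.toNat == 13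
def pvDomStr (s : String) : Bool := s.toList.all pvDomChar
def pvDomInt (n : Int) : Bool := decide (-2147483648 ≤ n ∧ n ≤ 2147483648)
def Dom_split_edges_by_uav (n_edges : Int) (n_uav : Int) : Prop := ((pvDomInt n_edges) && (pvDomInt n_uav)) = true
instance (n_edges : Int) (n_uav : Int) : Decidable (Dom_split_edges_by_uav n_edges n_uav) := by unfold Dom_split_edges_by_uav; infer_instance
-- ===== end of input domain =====

-- B replaces A's running-start accumulator with an independent closed-form boundary per block (alternative decomposition, same cost).

-- ===== PORT A =====
-- literal port: fold over range(n_uav) carrying (blocks, start)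
def split_edges_by_uav (n_edges : Int) (n_uav : Int) : List (Int × Int) :=
  let base := PySem.Int.floordiv n_edges n_uav
  let rem := PySem.Int.mod n_edges n_uav
  let st := (PySem.List.pyRange 0 n_uav 1).foldl
    (fun (st : List (Int × Int) × Int) i =>
      let size := base + (if i < rem then (1 : Int) else 0)
      (st.1 ++ [(st.2, st.2 + size)], st.2 + size))
    ([], 0)
  st.1

-- ===== PORT B =====
-- literal port of Source B: map the closed form over range(n_uav)
def split_edges_by_uav_alt (n_edges : Int) (n_uav : Int) : List (Int × Int) :=
  let base := PySem.Int.floordiv n_edges n_uav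
  let rem := PySem.Int.mod n_edges n_uav
  (PySem.List.pyRange 0 n_uav 1).map
    (fun i => (i * base + min i rem, (i + 1) * base + min (i + 1) rem))

-- ===== PRECONDITION & SPEC =====
-- A (and B) raise ZeroDivisionError when n_uav = 0; Pre_ excludes exactly that input.
def Pre_split_edges_by_uav (n_edges : Int) (n_uav : Int) : Prop := n_uav ≠ 0
instance (n_edges : Int) (n_uav : Int) : Decidable (Pre_split_edges_by_uav n_edges n_uav) := by unfold Pre_split_edges_by_uav; infer_instance
def pvWitness_split_edges_by_uav : Int × Int := (7, 3)

def Spec_split_edges_by_uav (n_edges : Int) (n_uav : Int) (out : List (Int × Int)) : Prop := out = split_edges_by_uav_alt n_edges n_uav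
instance (n_edges : Int) (n_uav : Int) (out : List (Int × Int)) : Decidable (Spec_split_edges_by_uav n_edges n_uav out) := by unfold Spec_split_edges_by_uav; infer_instance

-- ===== CLAIM (what is proved, stated in full; the proofs are below) =====
def Claim_equal_split_edges_by_uav : Prop := ∀ (n_edges : Int) (n_uav : Int), Dom_split_edges_by_uav n_edges n_uav → Pre_split_edges_by_uav n_edges n_uav → Spec_split_edges_by_uav n_edges n_uav (split_edges_by_uav n_edges n_uav)

-- ===== LEMMAS AND PROOFS =====

-- Invariant: folding A's loop body over range(0, n) yields B's closed-form blocks,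
-- with the running start equal to n*base + min n rem.
-- one step of A's accumulator advances B's closed-form start
theorem step_closed_form (base rem i : Int) :
    i * base + min i rem + (base + (if i < rem then (1 : Int) else 0))
      = (i + 1) * base + min (i + 1) rem := by
  by_cases h : i < rem
  · rw [if_pos h, min_eq_left h.le, min_eq_left (by omega : i + 1 ≤ rem)]; ring
  · rw [if_neg h, min_eq_right (by omega : rem ≤ i), min_eq_right (by omega : rem ≤ i + 1)]; ring

theorem split_fold_invariant (base rem : Int) (hr : 0 ≤ rem) (n : Nat) :
    (PySem.List.pyRange 0 (n : Int) 1).foldl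
      (fun (st : List (Int × Int) × Int) i =>
        let size := base + (if i < rem then (1 : Int) else 0)
        (st.1 ++ [(st.2, st.2 + size)], st.2 + size))
      ([], 0)
    = ((PySem.List.pyRange 0 (n : Int) 1).map
        (fun i => (i * base + min i rem, (i + 1) * base + min (i + 1) rem)),
       (n : Int) * base + min (n : Int) rem) := by
  induction n with
  | zero => simp [min_eq_left hr]
  | succ k ih =>
    have h1 : ((k : Int) + 1 : Int) = ((k + 1 : Nat) : Int) := by push_cast; ring
    have hk : (0 : Int) ≤ (k : Int) := Int.natCast_nonneg k
    rw [← h1, PySem.List.pyRange_one_succ_right hk, List.foldl_append, List.map_append, ih]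
    simp only [List.foldl_cons, List.foldl_nil, List.map_cons, List.map_nil]
    rw [step_closed_form base rem (k : Int)]

-- ===== VERDICT (by name: the statement is the Claim_ definition above) =====
theorem split_edges_by_uav_spec : Claim_equal_split_edges_by_uav := by
  intro n_edges n_uav _ _
  unfold Spec_split_edges_by_uav split_edges_by_uav split_edges_by_uav_alt
  by_cases h : n_uav ≤ 0
  · simp [PySem.List.pyRange_one_eq_nil h]
  · have hpos : 0 < n_uav := by omega
    have hr : 0 ≤ PySem.Int.mod n_edges n_uav := by
      simp only [PySem.Int.mod]
      exact Int.fmod_nonneg_of_pos n_edges hpos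
    have hcast : n_uav = (n_uav.toNat : Int) := (Int.toNat_of_nonneg hpos.le).symm
    rw [hcast] at hr ⊢
    simp only [split_fold_invariant _ _ hr]
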